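-- pv_equiv track=rewrite | github.com/Quuxplusone/Homeworlds | herokuapp/worldmodel.py | reposition_catastrophes
-- ===== SOURCE A (Python) =====
-- def reposition_catastrophes(m):
--     actions = m.split('; ')
--     leading = 0
--     while leading < len(actions) and actions[leading].startswith('catastrophe'):
--         leading += 1
--     actions = (
--         actions[:leading] +
--         [a for a in actions[leading:] if not a.startswith('catastrophe')] +
--         [a for a in actions[leading:] if a.startswith('catastrophe')]
--     )
--     return '; '.join(actions)
-- ===== SOURCE B (Python) =====
-- def reposition_catastrophes(m):
--     actions = m.split('; ')
--     leading = next((i for i, a in enumerate(actions)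
--                     if not a.startswith('catastrophe')), len(actions))
--     tail = sorted(actions[leading:], key=lambda a: a.startswith('catastrophe'))
--     return '; '.join(actions[:leading] + tail)
-- ===== Notes on version B (the rewrite author's own statement) =====
-- stated objective: idiomatic
-- what changed: Replaces the two filtering comprehensions over the tail with a single stable sort keyed on the boolean is-a-catastrophe-action test (false sorts before true, stability preserves order), and computes the leading count with next/enumerate instead of an index while-loop.
import Mathlib
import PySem

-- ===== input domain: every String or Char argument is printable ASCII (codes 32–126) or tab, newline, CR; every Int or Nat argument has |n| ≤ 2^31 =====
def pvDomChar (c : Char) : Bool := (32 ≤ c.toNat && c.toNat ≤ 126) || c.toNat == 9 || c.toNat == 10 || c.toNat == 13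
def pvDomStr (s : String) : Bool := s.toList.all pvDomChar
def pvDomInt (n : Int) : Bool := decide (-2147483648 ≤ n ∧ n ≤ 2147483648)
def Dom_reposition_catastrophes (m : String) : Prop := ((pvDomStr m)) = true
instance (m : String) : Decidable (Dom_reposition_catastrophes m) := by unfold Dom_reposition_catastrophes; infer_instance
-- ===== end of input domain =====

-- B replaces A's two filtering passes over the tail with one stable sort keyed on startswith('catastrophe'); return values proved equal.
-- ===== PORT A =====
-- while leading < len(actions) and actions[leading].startswith('catastrophe'): leading += 1
def aLeading : List String → Nat
  | [] => 0
  | a :: rest => if PySem.Str.startswith a "catastrophe" then aLeading rest + 1 else 0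

def reposition_catastrophes (m : String) : String :=
  let actions := (PySem.Chars.splitOn m.toList "; ".toList).map String.ofList
  let leading := aLeading actions
  let actions2 :=
    PySem.List.slice actions none (some (leading : Int)) ++
    (PySem.List.slice actions (some (leading : Int)) none).filter
      (fun a => !(PySem.Str.startswith a "catastrophe")) ++
    (PySem.List.slice actions (some (leading : Int)) none).filter
      (fun a => PySem.Str.startswith a "catastrophe")
  PySem.Str.join "; " actions2

-- ===== PORT B =====
def reposition_catastrophes_alt (m : String) : String :=
  let actions := (PySem.Chars.splitOn m.toList "; ".toList).map String.ofList
  -- leading = next((i for i, a in enumerate(actions) if not a.startswith('catastrophe')), len(actions))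
  let leading := List.findIdx (fun a => !(PySem.Str.startswith a "catastrophe")) actions
  -- tail = sorted(actions[leading:], key=lambda a: a.startswith('catastrophe'))  (stable)
  let tail := PySem.List.sorted (PySem.List.slice actions (some (leading : Int)) none)
      (fun a => PySem.Str.startswith a "catastrophe") false
  PySem.Str.join "; " (PySem.List.slice actions none (some (leading : Int)) ++ tail)

-- ===== PRECONDITION & SPEC =====
def Spec_reposition_catastrophes (m : String) (out : String) : Prop := out = reposition_catastrophes_alt m
instance (m : String) (out : String) : Decidable (Spec_reposition_catastrophes m out) := by unfold Spec_reposition_catastrophes; infer_instance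

-- ===== CLAIM (what is proved, stated in full; the proofs are below) =====
def Claim_equal_reposition_catastrophes : Prop := ∀ (m : String), Dom_reposition_catastrophes m → Spec_reposition_catastrophes m (reposition_catastrophes m)

-- ===== LEMMAS AND PROOFS =====

-- A's while loop over indices equals B's first-index-of-non-catastrophe search.
theorem aLeading_eq_findIdx (xs : List String) :
    aLeading xs = List.findIdx (fun a => !(PySem.Str.startswith a "catastrophe")) xs := by
  induction xs with
  | nil => rfl
  | cons a rest ih =>
      simp only [aLeading, List.findIdx_cons]
      cases h : PySem.Str.startswith a "catastrophe" <;> simp [ih]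

-- insertBy skips a prefix it is never 'before'.
theorem insertBy_append_left {α : Type} (before : α → α → Bool) (x : α) (F T : List α)
    (hF : ∀ y ∈ F, before x y = false) :
    PySem.List.insertBy before x (F ++ T) = F ++ PySem.List.insertBy before x T := by
  induction F with
  | nil => rfl
  | cons f fs ih =>
      have hf : before x f = false := hF f (by simp)
      simp only [List.cons_append, PySem.List.insertBy, hf]
      simp only [Bool.false_eq_true, if_false]
      rw [ih (fun y hy => hF y (by simp [hy]))]

-- One foldl-insertBy step preserves the partition F (key false) ++ T (key true).
theorem foldl_ins_partition {α : Type} (key : α → Bool) (xs : List α) :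
    ∀ (F T : List α), (∀ y ∈ F, key y = false) → (∀ y ∈ T, key y = true) →
    xs.foldl (fun acc x => PySem.List.insertBy (fun a b => decide (key a < key b)) x acc) (F ++ T)
      = (F ++ xs.filter (fun a => !key a)) ++ (T ++ xs.filter key) := by
  induction xs with
  | nil => intro F T _ _; simp
  | cons x xs ih =>
      intro F T hF hT
      simp only [List.foldl_cons]
      cases hx : key x with
      | true =>
          have hstep : PySem.List.insertBy (fun a b => decide (key a < key b)) x (F ++ T)
              = (F ++ T) ++ [x] := by
            apply PySem.List.insertBy_of_forall_not_before
            intro y _; simp [hx]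
          rw [hstep]
          have : (F ++ T) ++ [x] = F ++ (T ++ [x]) := by simp
          rw [this, ih F (T ++ [x]) hF (by intro y hy; rcases List.mem_append.1 hy with h | h
                                           · exact hT y h
                                           · simp at h; simp [h, hx])]
          simp [hx]
      | false =>
          have hstep : PySem.List.insertBy (fun a b => decide (key a < key b)) x (F ++ T)
              = (F ++ [x]) ++ T := by
            rw [insertBy_append_left _ _ _ _ (fun y hy => by simp [hx, hF y hy])]
            cases T with
            | nil => simp [PySem.List.insertBy]
            | cons t ts =>
                have ht : key t = true := hT t (by simp)
                simp [PySem.List.insertBy, hx, ht]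
          rw [hstep, ih (F ++ [x]) T (by intro y hy; rcases List.mem_append.1 hy with h | h
                                         · exact hF y h
                                         · simp at h; simp [h, hx]) hT]
          simp [hx]

-- Python's stable sort on a Bool key is exactly A's two-filter partition.
theorem sorted_bool_partition {α : Type} (key : α → Bool) (xs : List α) :
    PySem.List.sorted xs key false = xs.filter (fun a => !key a) ++ xs.filter key := by
  rw [PySem.List.sorted_eq_foldl_insertBy]
  have := foldl_ins_partition key xs [] [] (by simp) (by simp)
  simpa using this

-- ===== VERDICT (by name: the statement is the Claim_ definition above) =====
theorem reposition_catastrophes_spec : Claim_equal_reposition_catastrophes := by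
  intro m _
  unfold Spec_reposition_catastrophes reposition_catastrophes reposition_catastrophes_alt
  simp only [← aLeading_eq_findIdx, sorted_bool_partition, List.append_assoc]
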